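-- pv_equiv track=rewrite | github.com/yodigi7/kattis | geneticSearch.py | type3
-- ===== SOURCE A (Python) =====
-- def patternInSeq(patt, seq):
--     counter = 0
--     pattLen = len(patt)
--     for i in range(len(seq)-pattLen+1):
--         if patt == seq[i:i+pattLen]:
--             counter += 1
--     return counter
--
-- def testList(myList, seq):
--     myList = list(set(myList))
--     counter = 0
--     for entry in myList:
--         counter += patternInSeq(entry, seq)
--     return counter
--
-- def type3(patt, seq):
--     myList = []
--     for i in range(0, len(patt)+1):
--         for char in ['A', 'T', 'C', 'G']:
--             holder = list(patt)
--             holder.insert(i, char)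
--             myList.append(''.join(holder))
--     return testList(myList, seq)
-- ===== SOURCE B (Python) =====
-- def type3(patt, seq):
--     m = len(patt)
--     count = 0
--     for i in range(len(seq) - m):
--         w = seq[i:i + m + 1]
--         p = 0
--         while p < m and w[p] == patt[p]:
--             p += 1
--         if w[p] in 'ATCG' and w[p + 1:] == patt[p:]:
--             count += 1
--     return count
-- ===== Notes on version B (the rewrite author's own statement) =====
-- stated objective: faster
-- what changed: Instead of generating all 4*(m+1) single-insertion variant strings, deduplicating them with a set and scanning the sequence once per variant, B makes a single pass over the sequence and tests each length-(m+1) window directly for being a single-ATCG-insertion variant of the pattern via a first-mismatch skip check.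
import Mathlib
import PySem

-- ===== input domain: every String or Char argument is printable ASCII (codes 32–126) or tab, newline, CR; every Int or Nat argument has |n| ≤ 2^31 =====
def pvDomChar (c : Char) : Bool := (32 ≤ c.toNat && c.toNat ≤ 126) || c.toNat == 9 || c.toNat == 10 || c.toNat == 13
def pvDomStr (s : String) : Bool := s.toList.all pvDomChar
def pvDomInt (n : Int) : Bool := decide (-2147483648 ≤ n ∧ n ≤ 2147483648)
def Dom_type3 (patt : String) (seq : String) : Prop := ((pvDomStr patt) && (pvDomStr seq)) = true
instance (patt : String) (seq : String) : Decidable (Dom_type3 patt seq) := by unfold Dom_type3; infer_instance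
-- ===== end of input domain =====

-- B replaces A's generate-all-insertion-variants-then-scan-per-variant search by a single pass that tests
-- each length-(m+1) window directly with a first-mismatch skip check (objective: faster).


-- ===== PORT A =====
def patternInSeq (patt : List Char) (seq : List Char) : Int :=
  let pattLen : Int := patt.length
  (PySem.List.pyRange 0 ((seq.length : Int) - pattLen + 1) 1).foldl
    (fun counter i =>
      if patt = PySem.List.slice seq (some i) (some (i + pattLen)) then counter + 1 else counter) 0
def testList (myList : List (List Char)) (seq : List Char) : Int :=
  (PySem.Set.ofList myList).foldl (fun counter entry => counter + patternInSeq entry seq) 0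
def type3 (patt : String) (seq : String) : Int :=
  let myList : List (List Char) :=
    (PySem.List.pyRange 0 ((patt.toList.length : Int) + 1) 1).foldl
      (fun acc i =>
        (['A', 'T', 'C', 'G'] : List Char).foldl
          (fun acc c => acc ++ [PySem.List.insert patt.toList i c]) acc) []
  testList myList seq.toList
-- ===== PORT B =====
def mismatchAt : List Char → List Char → Nat
  | a :: w, b :: p => if a = b then mismatchAt w p + 1 else 0
  | _, _ => 0
def insCheck (patt : List Char) (w : List Char) : Bool :=
  let p := mismatchAt w patt
  match w.drop p with
  | c :: rest => (c == 'A' || c == 'T' || c == 'C' || c == 'G') && rest == patt.drop p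
  | [] => false
def type3_alt (patt : String) (seq : String) : Int :=
  let m : Int := patt.toList.length
  (PySem.List.pyRange 0 ((seq.toList.length : Int) - m) 1).foldl
    (fun count i =>
      if insCheck patt.toList (PySem.List.slice seq.toList (some i) (some (i + m + 1)))
      then count + 1 else count) 0
-- ===== PRECONDITION & SPEC =====
def Spec_type3 (patt : String) (seq : String) (out : Int) : Prop := out = type3_alt patt seq
instance (patt : String) (seq : String) (out : Int) : Decidable (Spec_type3 patt seq out) := by unfold Spec_type3; infer_instance

-- ===== CLAIM (what is proved, stated in full; the proofs are below) =====
def Claim_equal_type3 : Prop := ∀ (patt : String) (seq : String), Dom_type3 patt seq → Spec_type3 patt seq (type3 patt seq)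

-- ===== LEMMAS AND PROOFS =====

-- w is patt with one character of ATCG inserted at some position
def IsVar (patt : List Char) (w : List Char) : Prop :=
  ∃ j c, j ≤ patt.length ∧ c ∈ (['A', 'T', 'C', 'G'] : List Char) ∧
    w = patt.take j ++ c :: patt.drop j
lemma isVar_nil (w : List Char) :
    IsVar [] w ↔ ∃ c ∈ (['A', 'T', 'C', 'G'] : List Char), w = [c] := by
  constructor
  · rintro ⟨j, c, hj, hc, hw⟩; exact ⟨c, hc, by simpa using hw⟩
  · rintro ⟨c, hc, rfl⟩; exact ⟨0, c, Nat.le_refl _, hc, rfl⟩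

lemma isVar_cons (a : Char) (p w : List Char) :
    IsVar (a :: p) w ↔
      (∃ c ∈ (['A', 'T', 'C', 'G'] : List Char), w = c :: a :: p) ∨
      (∃ w', w = a :: w' ∧ IsVar p w') := by
  constructor
  · rintro ⟨j, c, hj, hc, hw⟩
    match j with
    | 0 => exact Or.inl ⟨c, hc, by simpa using hw⟩
    | k + 1 =>
      right
      simp only [List.take_succ_cons, List.drop_succ_cons, List.cons_append] at hw
      exact ⟨_, hw, k, c, Nat.succ_le_succ_iff.mp hj, hc, rfl⟩
  · rintro (⟨c, hc, rfl⟩ | ⟨w', rfl, k, c, hk, hc, rfl⟩)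
    · exact ⟨0, c, Nat.zero_le _, hc, rfl⟩
    · exact ⟨k + 1, c, Nat.succ_le_succ hk, hc, by simp⟩

lemma insCheck_iff (patt w : List Char) : insCheck patt w = true ↔ IsVar patt w := by
  induction patt generalizing w with
  | nil =>
    cases w with
    | nil => simp [insCheck, mismatchAt, isVar_nil]
    | cons b w' =>
      rw [isVar_nil]
      simp only [insCheck, mismatchAt, List.drop_zero, Bool.and_eq_true, Bool.or_eq_true,
        beq_iff_eq, List.mem_cons, List.not_mem_nil, or_false]
      constructor
      · rintro ⟨hb, rfl⟩; exact ⟨b, by tauto, rfl⟩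
      · rintro ⟨c, hc, h⟩
        obtain ⟨rfl, rfl⟩ := List.cons_eq_cons.mp h
        exact ⟨by tauto, rfl⟩
  | cons a p ih =>
    cases w with
    | nil =>
      rw [isVar_cons]
      simp [insCheck, mismatchAt]
    | cons b w' =>
      rw [isVar_cons]
      by_cases hab : b = a
      · subst hab
        have hred : insCheck (b :: p) (b :: w') = insCheck p w' := by
          simp [insCheck, mismatchAt]
        rw [hred, ih]
        constructor
        · intro h; exact Or.inr ⟨w', rfl, h⟩
        · rintro (⟨c, hc, h⟩ | ⟨w'', hw, h⟩)
          · obtain ⟨rfl, h2⟩ := List.cons_eq_cons.mp h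
            subst h2
            exact ⟨0, b, Nat.zero_le _, hc, rfl⟩
          · obtain ⟨_, h2⟩ := List.cons_eq_cons.mp hw
            subst h2; exact h
      · have h0 : mismatchAt (b :: w') (a :: p) = 0 := by simp [mismatchAt, hab]
        simp only [insCheck, h0, List.drop_zero, Bool.and_eq_true, Bool.or_eq_true,
          beq_iff_eq, List.mem_cons, List.not_mem_nil, or_false]
        constructor
        · rintro ⟨hb, rfl⟩; exact Or.inl ⟨b, by tauto, rfl⟩
        · rintro (⟨c, hc, h⟩ | ⟨w'', h, _⟩)
          · obtain ⟨rfl, rfl⟩ := List.cons_eq_cons.mp h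
            exact ⟨by tauto, rfl⟩
          · exact absurd (List.cons_eq_cons.mp h).1 hab

lemma mem_myList (patt w : List Char) :
    (w ∈ (PySem.List.pyRange 0 ((patt.length : Int) + 1) 1).foldl
      (fun acc i =>
        (['A', 'T', 'C', 'G'] : List Char).foldl
          (fun acc c => acc ++ [PySem.List.insert patt i c]) acc) []) ↔ IsVar patt w := by
  have h1 : ∀ (acc : List (List Char)) (i : Int),
      (['A', 'T', 'C', 'G'] : List Char).foldl
        (fun acc c => acc ++ [PySem.List.insert patt i c]) acc
      = acc ++ (['A', 'T', 'C', 'G'] : List Char).map (fun c => PySem.List.insert patt i c) :=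
    fun acc i => PySem.List.foldl_append_singleton_eq_map _ _ _
  simp only [h1]
  rw [PySem.List.foldl_append_eq_flatMap]
  simp only [List.nil_append, List.mem_flatMap, List.mem_map, PySem.List.mem_pyRange_one]
  constructor
  · rintro ⟨i, ⟨hi0, hi1⟩, c, hc, rfl⟩
    obtain ⟨j, rfl⟩ : ∃ j : Nat, i = (j : Int) := ⟨i.toNat, (Int.toNat_of_nonneg hi0).symm⟩
    have hj : j ≤ patt.length := by exact_mod_cast Int.lt_add_one_iff.mp hi1
    exact ⟨j, c, hj, hc, (PySem.List.insert_natCast patt j c hj).symm ▸ rfl⟩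
  · rintro ⟨j, c, hj, hc, rfl⟩
    exact ⟨(j : Int), ⟨Int.natCast_nonneg j, by omega⟩,
      c, hc, (PySem.List.insert_natCast patt j c hj)⟩

lemma length_of_isVar (patt w : List Char) (h : IsVar patt w) : w.length = patt.length + 1 := by
  obtain ⟨j, c, hj, _, rfl⟩ := h
  simp

lemma indicator_sum {β : Type} [DecidableEq β] (S : List β) (hS : S.Nodup) (b : β) :
    (S.map (fun v => if v = b then (1 : Int) else 0)).sum = if b ∈ S then 1 else 0 := by
  induction S with
  | nil => simp
  | cons x S ih =>
    obtain ⟨hx, hS'⟩ := List.nodup_cons.mp hS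
    simp only [List.map_cons, List.sum_cons, List.mem_cons]
    by_cases hxb : x = b
    · subst hxb
      simp [ih hS', hx]
    · simp [hxb, ih hS', Ne.symm hxb]

lemma sum_countP_swap {α β : Type} [DecidableEq β] (S : List β) (hS : S.Nodup) (f : α → β)
    (R : List α) :
    (S.map (fun v => ((R.countP (fun i => decide (v = f i)) : Nat) : Int))).sum
      = ((R.countP (fun i => decide (f i ∈ S)) : Nat) : Int) := by
  induction R with
  | nil => simp
  | cons a R' ih =>
    simp only [List.countP_cons]
    push_cast
    have hsplit : (S.map (fun v => ((R'.countP (fun i => decide (v = f i)) : Nat) : Int)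
          + (if decide (v = f a) then (1 : Int) else 0))).sum
        = (S.map (fun v => ((R'.countP (fun i => decide (v = f i)) : Nat) : Int))).sum
          + (S.map (fun v => (if decide (v = f a) then (1 : Int) else 0))).sum :=
      PySem.List.sum_map_add_int _ _ _
    rw [hsplit, ih]
    have hone : (S.map (fun v => (if decide (v = f a) then (1 : Int) else 0))).sum
        = if f a ∈ S then (1 : Int) else 0 := by
      rw [← indicator_sum S hS (f a)]
      simp
    rw [hone]
    by_cases hm : f a ∈ S <;> simp [hm]

lemma pattInSeq_eq (v Sq : List Char) (m : Nat) (hv : v.length = m + 1) :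
    patternInSeq v Sq
      = ((PySem.List.pyRange 0 ((Sq.length : Int) - (m : Int)) 1).countP
          (fun i => decide (v = PySem.List.slice Sq (some i) (some (i + (m : Int) + 1)))) : Nat) := by
  unfold patternInSeq
  rw [PySem.List.foldl_ite_add_one]
  rw [zero_add]
  have hb : (Sq.length : Int) - (v.length : Int) + 1 = (Sq.length : Int) - (m : Int) := by
    rw [hv]; push_cast; ring
  rw [hb]
  congr 1
  apply List.countP_congr
  intro i _
  have h2 : i + (v.length : Int) = i + (m : Int) + 1 := by rw [hv]; push_cast; ring
  rw [h2]

-- ===== VERDICT (by name: the statement is the Claim_ definition above) =====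
theorem type3_spec : Claim_equal_type3 := by
  intro patt seq _
  unfold Spec_type3
  unfold type3 testList type3_alt
  rw [PySem.List.foldl_add, PySem.List.foldl_if_add_one, zero_add, zero_add]
  set L := patt.toList with hL
  set Sq := seq.toList with hSq
  set myL := (PySem.List.pyRange 0 ((L.length : Int) + 1) 1).foldl
      (fun acc i =>
        (['A', 'T', 'C', 'G'] : List Char).foldl
          (fun acc c => acc ++ [PySem.List.insert L i c]) acc) [] with hmyL
  set S := PySem.Set.ofList myL with hS
  have hvlen : ∀ v ∈ S, v.length = L.length + 1 := by
    intro v hv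
    exact length_of_isVar L v ((mem_myList L v).mp ((PySem.Set.mem_ofList myL v).mp hv))
  have hmap : S.map (fun v => patternInSeq v Sq)
      = S.map (fun v => ((PySem.List.pyRange 0 ((Sq.length : Int) - (L.length : Int)) 1).countP
          (fun i => decide (v = PySem.List.slice Sq (some i) (some (i + (L.length : Int) + 1)))) : Int)) := by
    apply List.map_congr_left
    intro v hv
    exact pattInSeq_eq v Sq L.length (hvlen v hv)
  rw [hmap, sum_countP_swap S (PySem.Set.nodup_ofList myL)
    (fun i => PySem.List.slice Sq (some i) (some (i + (L.length : Int) + 1)))]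
  congr 1
  apply List.countP_congr
  intro i _
  have hiff : (PySem.List.slice Sq (some i) (some (i + (L.length : Int) + 1)) ∈ S)
      ↔ insCheck L (PySem.List.slice Sq (some i) (some (i + (L.length : Int) + 1))) = true :=
    ((PySem.Set.mem_ofList myL _).trans ((mem_myList L _).trans (insCheck_iff L _).symm))
  by_cases h : insCheck L (PySem.List.slice Sq (some i) (some (i + (L.length : Int) + 1))) = true
  · rw [h]; simp [hiff.mpr h]
  · have hnm : ¬ (PySem.List.slice Sq (some i) (some (i + (L.length : Int) + 1)) ∈ S) :=
      fun hm => h (hiff.mp hm)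
    rw [Bool.not_eq_true] at h
    rw [h]
    simp [hnm]
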